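-- pv_equiv track=rewrite | github.com/aadie14/nestify | app/agentic/agents/code_intelligence_agent.py | _infer_runtime_framework
-- ===== SOURCE A (Python) =====
-- def _infer_runtime_framework(files: list[dict[str, str]]) -> tuple[str, str]:
--     runtime = "unknown"
--     framework = "unknown"
--
--     for file in files:
--         name = file.get("name", "")
--         content = file.get("content", "")
--         if name.endswith("requirements.txt") or name.endswith(".py"):
--             runtime = "python"
--         if name.endswith("package.json"):
--             runtime = "node"
--             package_blob = content.lower()
--             if '"next"' in package_blob:
--                 framework = "nextjs"
--             elif '"react"' in package_blob:
--                 framework = "react"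
--             elif '"vue"' in package_blob:
--                 framework = "vue"
--             elif '"svelte"' in package_blob:
--                 framework = "svelte"
--
--         lowered = content.lower()
--         if "fastapi" in lowered:
--             framework = "fastapi"
--         elif "flask" in lowered:
--             framework = "flask"
--         elif "django" in lowered:
--             framework = "django"
--
--     return runtime, framework
-- ===== SOURCE B (Python) =====
-- def _infer_runtime_framework(files: list[dict[str, str]]) -> tuple[str, str]:
--     runtime = _last_hit(_runtime_of(f.get("name", "")) for f in files)
--     framework = _last_hit(_framework_of(f.get("name", ""), f.get("content", "")) for f in files)
--     return runtime, framework
--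
--
-- def _last_hit(hits):
--     result = "unknown"
--     for hit in reversed(list(hits)):
--         if hit is not None:
--             return hit
--     return result
--
--
-- def _runtime_of(name):
--     if name.endswith("package.json"):
--         return "node"
--     if name.endswith("requirements.txt") or name.endswith(".py"):
--         return "python"
--     return None
--
--
-- def _framework_of(name, content):
--     lowered = content.lower()
--     for key in ("fastapi", "flask", "django"):
--         if key in lowered:
--             return key
--     if name.endswith("package.json"):
--         for needle, fw in (('"next"', "nextjs"), ('"react"', "react"),
--                            ('"vue"', "vue"), ('"svelte"', "svelte")):
--             if needle in lowered:
--                 return fw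
--     return None
-- ===== Notes on version B (the rewrite author's own statement) =====
-- stated objective: alternative
-- what changed: Replaces A's forward mutating fold over a (runtime, framework) pair by two independent per-file classifiers (Optional runtime / Optional framework per file) combined by a reverse scan returning the last non-None hit, with early termination.
import Mathlib
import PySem

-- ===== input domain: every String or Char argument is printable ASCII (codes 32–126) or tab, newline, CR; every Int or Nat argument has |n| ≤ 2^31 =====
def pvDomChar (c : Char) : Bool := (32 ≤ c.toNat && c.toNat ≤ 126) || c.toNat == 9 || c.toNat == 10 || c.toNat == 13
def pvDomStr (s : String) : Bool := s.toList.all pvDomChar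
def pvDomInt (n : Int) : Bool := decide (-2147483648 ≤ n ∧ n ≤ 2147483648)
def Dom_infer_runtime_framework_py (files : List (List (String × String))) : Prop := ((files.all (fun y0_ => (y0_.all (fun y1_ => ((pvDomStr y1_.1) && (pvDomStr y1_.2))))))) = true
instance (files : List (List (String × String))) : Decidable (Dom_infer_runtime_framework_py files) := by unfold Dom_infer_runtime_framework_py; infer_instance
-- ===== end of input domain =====

-- B replaces A's forward mutating fold by per-file classifiers combined with a last-hit reverse
-- scan (alternative decomposition, same cost). The return value is the same; neither mutates input.

-- ===== PORT A =====
-- one iteration of A's loop body over the (runtime, framework) accumulator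
def inferStepA (acc : String × String) (file : List (String × String)) : String × String :=
  let name := PySem.Dict.getD (PySem.Dict.mk file) "name" ""
  let content := PySem.Dict.getD (PySem.Dict.mk file) "content" ""
  let runtime1 := if PySem.Str.endswith name "requirements.txt" || PySem.Str.endswith name ".py" then "python" else acc.1
  let rf : String × String :=
    if PySem.Str.endswith name "package.json" then
      let package_blob := PySem.Str.lower content
      ("node",
        if PySem.Str.isIn "\"next\"" package_blob then "nextjs"
        else if PySem.Str.isIn "\"react\"" package_blob then "react"
        else if PySem.Str.isIn "\"vue\"" package_blob then "vue"
        else if PySem.Str.isIn "\"svelte\"" package_blob then "svelte"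
        else acc.2)
    else (runtime1, acc.2)
  let lowered := PySem.Str.lower content
  let framework :=
    if PySem.Str.isIn "fastapi" lowered then "fastapi"
    else if PySem.Str.isIn "flask" lowered then "flask"
    else if PySem.Str.isIn "django" lowered then "django"
    else rf.2
  (rf.1, framework)

def infer_runtime_framework_py (files : List (List (String × String))) : String × String :=
  files.foldl inferStepA ("unknown", "unknown")

-- ===== PORT B =====
def runtimeOf (name : String) : Option String :=
  if PySem.Str.endswith name "package.json" then some "node"
  else if PySem.Str.endswith name "requirements.txt" || PySem.Str.endswith name ".py" then some "python"
  else none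

def frameworkOf (name : String) (content : String) : Option String :=
  let lowered := PySem.Str.lower content
  match ["fastapi", "flask", "django"].findSome?
      (fun key => if PySem.Str.isIn key lowered then some key else none) with
  | some fw => some fw
  | none =>
    if PySem.Str.endswith name "package.json" then
      [("\"next\"", "nextjs"), ("\"react\"", "react"), ("\"vue\"", "vue"), ("\"svelte\"", "svelte")].findSome?
        (fun p => if PySem.Str.isIn p.1 lowered then some p.2 else none)
    else none

-- first non-None hit of the REVERSED hit list, default "unknown" (Source B's _last_hit)
def lastHit (hits : List (Option String)) : String :=
  (hits.reverse.findSome? id).getD "unknown"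

def infer_runtime_framework_py_alt (files : List (List (String × String))) : String × String :=
  (lastHit (files.map (fun f => runtimeOf (PySem.Dict.getD (PySem.Dict.mk f) "name" ""))),
   lastHit (files.map (fun f => frameworkOf (PySem.Dict.getD (PySem.Dict.mk f) "name" "")
                                            (PySem.Dict.getD (PySem.Dict.mk f) "content" ""))))

-- ===== PRECONDITION & SPEC =====
def Spec_infer_runtime_framework_py (files : List (List (String × String))) (out : String × String) : Prop := out = infer_runtime_framework_py_alt files
instance (files : List (List (String × String))) (out : String × String) : Decidable (Spec_infer_runtime_framework_py files out) := by unfold Spec_infer_runtime_framework_py; infer_instance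

-- ===== CLAIM (what is proved, stated in full; the proofs are below) =====
def Claim_equal_infer_runtime_framework_py : Prop := ∀ (files : List (List (String × String))), Dom_infer_runtime_framework_py files → Spec_infer_runtime_framework_py files (infer_runtime_framework_py files)

-- ===== LEMMAS AND PROOFS =====

-- A's loop body acts on each accumulator component as "override by the per-file hit if any"
lemma inferStepA_eq (acc : String × String) (f : List (String × String)) :
    inferStepA acc f =
      ((runtimeOf (PySem.Dict.getD (PySem.Dict.mk f) "name" "")).getD acc.1,
       (frameworkOf (PySem.Dict.getD (PySem.Dict.mk f) "name" "")
                    (PySem.Dict.getD (PySem.Dict.mk f) "content" "")).getD acc.2) := by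
  simp only [inferStepA, runtimeOf, frameworkOf, List.findSome?]
  split_ifs <;> simp_all

lemma foldl_inferStepA_eq (l : List (List (String × String))) (rt fw : String) :
    l.foldl inferStepA (rt, fw) =
      (((l.map (fun f => runtimeOf (PySem.Dict.getD (PySem.Dict.mk f) "name" ""))).reverse.findSome? id).getD rt,
       ((l.map (fun f => frameworkOf (PySem.Dict.getD (PySem.Dict.mk f) "name" "")
                                     (PySem.Dict.getD (PySem.Dict.mk f) "content" ""))).reverse.findSome? id).getD fw) := by
  induction l generalizing rt fw with
  | nil => simp
  | cons f t ih =>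
    simp only [List.foldl_cons, inferStepA_eq, ih, List.map_cons, List.reverse_cons,
      List.findSome?_append]
    cases hr : (t.map (fun f => runtimeOf (PySem.Dict.getD (PySem.Dict.mk f) "name" ""))).reverse.findSome? id <;>
    cases hf : (t.map (fun f => frameworkOf (PySem.Dict.getD (PySem.Dict.mk f) "name" "")
        (PySem.Dict.getD (PySem.Dict.mk f) "content" ""))).reverse.findSome? id <;>
      cases runtimeOf ((PySem.Dict.mk f).getD "name" "") <;>
      cases frameworkOf ((PySem.Dict.mk f).getD "name" "") ((PySem.Dict.mk f).getD "content" "") <;>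
      simp [List.findSome?, Option.getD]

-- ===== VERDICT (by name: the statement is the Claim_ definition above) =====
theorem infer_runtime_framework_py_spec : Claim_equal_infer_runtime_framework_py := by
  intro files _
  unfold Spec_infer_runtime_framework_py infer_runtime_framework_py infer_runtime_framework_py_alt lastHit
  rw [foldl_inferStepA_eq]
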